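-- pv_equiv track=rewrite | github.com/OUIsolutions/CWebStudio | Build/CToolKit/readme_converter.py | get_code_reference
-- ===== SOURCE A (Python) =====
-- def get_code_reference(line:str)->str or None:
--     test = ''
--     TARGET  = '<!--codeof:'
--     inclusion = ''
--     found_start = False
--
--     for letter in line:
--
--         if found_start == False:
--             if letter == ' ':
--                 continue
--
--             if not TARGET.startswith(test):
--                 return None
--
--             test+=letter
--
--             if test == TARGET:
--                 found_start = True
--                 continue
--
--         if found_start:
--
--             if letter == '-':
--                 return inclusion.strip()
--
--             inclusion+=letter
--
--     return None
-- ===== SOURCE B (Python) =====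
-- def get_code_reference(line):
--     TARGET = '<!--codeof:'
--     ti = 0
--     i = 0
--     n = len(line)
--     while ti < len(TARGET):
--         if i == n:
--             return None
--         c = line[i]
--         i += 1
--         if c == ' ':
--             continue
--         if c != TARGET[ti]:
--             return None
--         ti += 1
--     head, sep, _tail = line[i:].partition('-')
--     if not sep:
--         return None
--     return head.strip()
-- ===== Notes on version B (the rewrite author's own statement) =====
-- stated objective: simpler
-- what changed: Replaced A's found_start/test/inclusion state machine (accumulating a growing prefix string and re-checking startswith each step) by a two-pointer walk of one index along the line and one along the fixed target, followed by partition('-') on the remaining slice.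
import Mathlib
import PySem

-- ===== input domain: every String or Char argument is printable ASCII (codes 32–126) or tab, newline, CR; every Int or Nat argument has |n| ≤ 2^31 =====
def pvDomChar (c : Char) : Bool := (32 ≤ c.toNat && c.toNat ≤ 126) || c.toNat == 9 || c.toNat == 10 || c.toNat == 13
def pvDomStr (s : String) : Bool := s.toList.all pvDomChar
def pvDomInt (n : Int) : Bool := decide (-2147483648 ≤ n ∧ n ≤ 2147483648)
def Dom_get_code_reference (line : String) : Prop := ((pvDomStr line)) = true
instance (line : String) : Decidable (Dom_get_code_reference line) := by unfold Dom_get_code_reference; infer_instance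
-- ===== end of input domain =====

-- B replaces A's found_start/test/inclusion state machine by a two-pointer prefix
-- match followed by str.partition('-'); objective: simpler, same cost.

-- ===== PORT A =====
def pvTARGET : List Char := ['<', '!', '-', '-', 'c', 'o', 'd', 'e', 'o', 'f', ':']

def pvLoopA (l : List Char) (test inclusion : List Char) (found_start : Bool) : Option String :=
  match l with
  | [] => none
  | letter :: rest =>
    if found_start = false then
      if letter = ' ' then pvLoopA rest test inclusion found_start
      else if ¬ (test.isPrefixOf pvTARGET) then none
      else
        let test' := test ++ [letter]
        if test' = pvTARGET then pvLoopA rest test' inclusion true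
        else pvLoopA rest test' inclusion false
    else
      if letter = '-' then some (String.ofList (PySem.Chars.strip inclusion))
      else pvLoopA rest test (inclusion ++ [letter]) found_start

def get_code_reference (line : String) : Option String :=
  pvLoopA line.toList [] [] false

-- ===== PORT B =====
-- two-pointer walk: consume line chars, skipping spaces, against the remaining target
def pvMatchB (l : List Char) (tgt : List Char) : Option (List Char) :=
  match tgt with
  | [] => some l
  | t :: ts =>
    match l with
    | [] => none
    | c :: cs =>
      if c = ' ' then pvMatchB cs (t :: ts)
      else if c ≠ t then none
      else pvMatchB cs ts

def get_code_reference_alt (line : String) : Option String :=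
  match pvMatchB line.toList pvTARGET with
  | none => none
  | some rest =>
    -- rest.partition('-') : head = chars before the first '-', sep nonempty iff '-' occurs
    let head := rest.takeWhile (· ≠ '-')
    if ¬ (rest.contains '-') then none
    else some (String.ofList (PySem.Chars.strip head))

-- ===== PRECONDITION & SPEC =====
def Spec_get_code_reference (line : String) (out : Option String) : Prop := out = get_code_reference_alt line
instance (line : String) (out : Option String) : Decidable (Spec_get_code_reference line out) := by unfold Spec_get_code_reference; infer_instance

-- ===== CLAIM (what is proved, stated in full; the proofs are below) =====
def Claim_equal_get_code_reference : Prop := ∀ (line : String), Dom_get_code_reference line → Spec_get_code_reference line (get_code_reference line)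

-- ===== LEMMAS AND PROOFS =====

-- phase 2 of A (found_start = true) returns strip of everything up to the first '-'
theorem pvLoopA_true (l : List Char) : ∀ (test inc : List Char),
    pvLoopA l test inc true =
      if l.contains '-' then some (String.ofList (PySem.Chars.strip (inc ++ l.takeWhile (· ≠ '-'))))
      else none := by
  induction l with
  | nil => intro test inc; simp [pvLoopA]
  | cons c cs ih =>
    intro test inc
    by_cases hc : c = '-'
    · subst hc; simp [pvLoopA]
    · simp [pvLoopA, hc, Ne.symm hc, ih, List.append_assoc]

-- once test is not a prefix of TARGET, A can only return none
theorem pvLoopA_nonprefix (l : List Char) : ∀ (test inc : List Char),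
    test.isPrefixOf pvTARGET = false → pvLoopA l test inc false = none := by
  induction l with
  | nil => intro test inc _; simp [pvLoopA]
  | cons c cs ih =>
    intro test inc h
    by_cases hc : c = ' '
    · subst hc; simp [pvLoopA, ih _ _ h]
    · simp [pvLoopA, hc, h]

theorem pvLoopA_main (l : List Char) : ∀ (test ts inc : List Char),
    pvTARGET = test ++ ts → ts ≠ [] →
    pvLoopA l test inc false =
      (match pvMatchB l ts with
       | none => none
       | some rest =>
         if rest.contains '-'
         then some (String.ofList (PySem.Chars.strip (inc ++ rest.takeWhile (· ≠ '-'))))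
         else none) := by
  induction l with
  | nil =>
    intro test ts inc _ hts
    cases ts with
    | nil => exact absurd rfl hts
    | cons t ts' => simp [pvLoopA, pvMatchB]
  | cons c cs ih =>
    intro test ts inc htgt hts
    cases ts with
    | nil => exact absurd rfl hts
    | cons t ts' =>
      by_cases hsp : c = ' '
      · subst hsp
        have : (' ' : Char) ≠ t := by
          intro he
          have : (' ' : Char) ∈ pvTARGET := by rw [htgt, he]; simp
          simp [pvTARGET] at this
        simp only [pvLoopA, pvMatchB]
        exact ih test (t :: ts') inc htgt hts
      · have hpre : test.isPrefixOf pvTARGET = true := by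
          rw [List.isPrefixOf_iff_prefix, htgt]; exact List.prefix_append _ _
        by_cases hct : c = t
        · subst hct
          cases ts' with
          | nil =>
            have heq : test ++ [c] = pvTARGET := by rw [htgt]
            simp [pvLoopA, hsp, hpre, heq, pvMatchB, pvLoopA_true]
          | cons u us =>
            have hne : test ++ [c] ≠ pvTARGET := by
              rw [htgt]
              intro he
              have h2 : [c] = c :: u :: us := List.append_cancel_left he
              simp at h2
            simp [pvLoopA, pvMatchB, hsp, hpre, hne,
              ih (test ++ [c]) (u :: us) inc (by rw [htgt]; simp) (by simp)]
        · have hne : test ++ [c] ≠ pvTARGET := by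
            rw [htgt]
            intro he
            have h2 : [c] = t :: ts' := List.append_cancel_left he
            simp at h2
            exact hct h2.1
          have hbad : (test ++ [c]).isPrefixOf pvTARGET = false := by
            rw [Bool.eq_false_iff]
            intro hp
            rw [List.isPrefixOf_iff_prefix, htgt, List.prefix_append_right_inj,
              List.cons_prefix_cons] at hp
            exact hct hp.1
          simp [pvLoopA, pvMatchB, hsp, hpre, hne, hct,
            pvLoopA_nonprefix cs _ inc hbad]

-- ===== VERDICT (by name: the statement is the Claim_ definition above) =====
theorem get_code_reference_spec : Claim_equal_get_code_reference := by
  intro line _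
  unfold Spec_get_code_reference get_code_reference get_code_reference_alt
  rw [pvLoopA_main line.toList [] pvTARGET [] rfl (by simp [pvTARGET])]
  cases h : pvMatchB line.toList pvTARGET with
  | none => rfl
  | some rest => simp
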